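-- pv_equiv track=rewrite | github.com/jonojace/fairseq | fairseq/data/audio/speech_audio_corrector_utils.py | get_word_pos
-- ===== SOURCE A (Python) =====
-- def get_word_pos(graphemes, padding_idx, bpe_whitespace_tok="▁", boundary_same_pos=True,
--                  append_eos=False, eos_symbol="</s>", boundary_start_pos=None):
--     """
--     for some space delimited sequence of symbols (e.g. text)
--
--     return words and their word pos
--
--     and also word pos of each grapheme in the seq (a list of the same length,
--     of ints representing the words that each symbol / whitespace corresponds to)
--
--     by default the boundary start position is initiated as padding_idx + 1
--     and then word counts start from that value
--
--     args:
--         text: str of space delimited graphemes in the utterance ('_' denotes whitespace in the original utterance)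
--               e.g. "_ h o w _ a r e _ y o u" this is the format returned by sentence piece tokeniser
--
--     e.g.
--     _ h o w _ a r e _ y o u
--         padding_idx == 1
--         boundary_start_pos == 2
--         boundary_same_pos == True
--
--         before padding:
--             [('how', 3), ('are', 4), ('you', 5)]
--             [2, 3, 3, 3, 2, 4, 4, 4, 2, 5, 5, 5, 6]
--         after concat with speechreps and padding (not performed in this fn, performed in SAC dataset collater):
--             [2, 3, 3, 3, 2, 4, 4, 4, 2, 5, 5, 5, 6, <speechreps>, 1, 1, 1, ...]
--
--     _ h o w _ a r e _ y o u
--         padding_idx == 1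
--         boundary_start_pos == 2
--         boundary_same_pos == False
--
--         before padding:
--             [('how', 3), ('are', 5), ('you', 7)]
--             [2, 3, 3, 3, 4, 5, 5, 5, 6, 7, 7, 7, 8]
--         after concat with speechreps and padding (not performed in this fn, performed in SAC dataset collater):
--             [2, 3, 3, 3, 4, 5, 5, 5, 6, 7, 7, 7, 8, <speechreps>, 1, 1, 1, ...]
--     """
--     # double check that we are dealing with a seq output by bpe tokenizer
--     assert graphemes[0] == bpe_whitespace_tok, f"graphemes == {graphemes}"
--
--     if boundary_start_pos is None:
--         boundary_start_pos = padding_idx + 1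
--
--     if boundary_same_pos:
--         word_count = boundary_start_pos
--     else:
--         word_count = padding_idx
--
--     word_and_word_pos = []
--     word_pos_of_graphemes = []
--     current_word = ""
--
--     for i, c in enumerate(graphemes):
--         # reached the last symbol of the utt
--         if c == eos_symbol:
--             word_and_word_pos.append((current_word, word_count))  # add last word
--             word_pos_of_graphemes.append(word_count + 1)
--
--         # whitespace
--         elif c == bpe_whitespace_tok:
--             if current_word:  # at a whitespace token AFTER processing at least one word
--                 word_and_word_pos.append((current_word, word_count))
--                 current_word = ""
--             if boundary_same_pos:
--                 word_pos_of_graphemes.append(boundary_start_pos)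
--             else:
--                 word_count += 1  # because we count each whitespace_tok as a new word position
--                 word_pos_of_graphemes.append(word_count)
--
--         # processing a grapheme in a word
--         else:
--             if graphemes[i - 1] == bpe_whitespace_tok:
--                 word_count += 1  # only increment word position if we are at the beginning of a new word, not within it
--             word_pos_of_graphemes.append(word_count)
--             current_word += c
--
--     if append_eos:
--         word_pos_of_graphemes.append(word_count + 1)
--
--     return word_and_word_pos, word_pos_of_graphemes
-- ===== SOURCE B (Python) =====
-- def get_word_pos(graphemes, padding_idx, bpe_whitespace_tok="▁", boundary_same_pos=True,
--                  append_eos=False, eos_symbol="</s>", boundary_start_pos=None):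
--     assert graphemes[0] == bpe_whitespace_tok, f"graphemes == {graphemes}"
--
--     if boundary_start_pos is None:
--         boundary_start_pos = padding_idx + 1
--
--     # phase 1: parse the token sequence into segments:
--     # ('eos',) | ('ws',) | ('word', text, length, after_ws)
--     segs = []
--     prev = ""
--     i, n = 0, len(graphemes)
--     while i < n:
--         t = graphemes[i]
--         if t == eos_symbol:
--             segs.append(('eos',))
--             prev, i = t, i + 1
--         elif t == bpe_whitespace_tok:
--             segs.append(('ws',))
--             prev, i = t, i + 1
--         else:
--             j = i + 1
--             while j < n and graphemes[j] != eos_symbol and graphemes[j] != bpe_whitespace_tok: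
--                 j += 1
--             segs.append(('word', "".join(graphemes[i:j]), j - i, prev == bpe_whitespace_tok))
--             prev, i = graphemes[j - 1], j
--
--     # phase 2: assign word positions segment by segment
--     word_count = boundary_start_pos if boundary_same_pos else padding_idx
--     words, pos, cur = [], [], ""
--     for seg in segs:
--         if seg[0] == 'eos':
--             words.append((cur, word_count))
--             pos.append(word_count + 1)
--         elif seg[0] == 'ws':
--             if cur:
--                 words.append((cur, word_count))
--                 cur = ""
--             if boundary_same_pos:
--                 pos.append(boundary_start_pos)
--             else:
--                 word_count += 1
--                 pos.append(word_count)
--         else: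
--             _, text, length, after_ws = seg
--             if after_ws:
--                 word_count += 1
--             pos.extend([word_count] * length)
--             cur += text
--     if append_eos:
--         pos.append(word_count + 1)
--     return words, pos
-- ===== Notes on version B (the rewrite author's own statement) =====
-- stated objective: alternative
-- what changed: B replaces A's per-symbol state machine (with index-based previous-token lookup) by a two-phase decomposition: first parse the tokens into a segment list (whitespace, eos, maximal word runs with their assembled text, length and after-whitespace flag), then fold over the segments, expanding each word run in bulk with list replication.
import Mathlib
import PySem

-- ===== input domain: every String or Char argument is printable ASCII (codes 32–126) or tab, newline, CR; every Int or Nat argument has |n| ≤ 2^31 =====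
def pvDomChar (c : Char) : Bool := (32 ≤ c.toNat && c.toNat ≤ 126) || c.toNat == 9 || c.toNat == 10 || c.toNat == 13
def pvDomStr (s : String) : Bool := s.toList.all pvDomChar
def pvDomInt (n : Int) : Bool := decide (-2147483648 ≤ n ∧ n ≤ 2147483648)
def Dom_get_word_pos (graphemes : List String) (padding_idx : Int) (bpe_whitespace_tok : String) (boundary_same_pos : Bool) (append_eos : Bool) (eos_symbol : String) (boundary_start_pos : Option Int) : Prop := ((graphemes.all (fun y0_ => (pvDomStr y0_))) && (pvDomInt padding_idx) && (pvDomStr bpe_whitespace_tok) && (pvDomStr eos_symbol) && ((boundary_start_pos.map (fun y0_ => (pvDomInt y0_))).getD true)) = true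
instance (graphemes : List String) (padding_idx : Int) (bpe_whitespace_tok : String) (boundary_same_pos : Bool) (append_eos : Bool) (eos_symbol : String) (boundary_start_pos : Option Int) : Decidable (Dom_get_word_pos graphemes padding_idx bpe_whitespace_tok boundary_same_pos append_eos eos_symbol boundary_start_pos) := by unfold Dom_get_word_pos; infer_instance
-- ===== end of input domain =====

-- B re-derives the same outputs by a two-phase parse-into-segments / fold-over-segments
-- decomposition instead of A's per-symbol state machine; same asymptotic cost (objective: alternative).

-- ===== PORT A =====
-- loop state: (word_and_word_pos, word_pos_of_graphemes, current_word, word_count);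
-- `(PySem.List.pyGet? graphemes (i-1)).getD ""` is graphemes[i-1] (exact whenever the loop runs,
-- since then graphemes is nonempty and -1 wraps to the last element, so pyGet? is never none).
def pvALoop (graphemes : List String) (ws eos : String) (same : Bool) (bsp : Int) :
    Nat → List String → (List (String × Int)) × List Int × String × Int →
    (List (String × Int)) × List Int × String × Int
  | _, [], st => st
  | i, c :: rest, (wwp, wpg, cur, wc) =>
    if c = eos then
      pvALoop graphemes ws eos same bsp (i + 1) rest (wwp ++ [(cur, wc)], wpg ++ [wc + 1], cur, wc)
    else if c = ws then
      let p := if cur ≠ "" then (wwp ++ [(cur, wc)], "") else (wwp, cur)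
      if same then
        pvALoop graphemes ws eos same bsp (i + 1) rest (p.1, wpg ++ [bsp], p.2, wc)
      else
        pvALoop graphemes ws eos same bsp (i + 1) rest (p.1, wpg ++ [wc + 1], p.2, wc + 1)
    else
      let wc' := if (PySem.List.pyGet? graphemes ((i : Int) - 1)).getD "" = ws then wc + 1 else wc
      pvALoop graphemes ws eos same bsp (i + 1) rest (wwp, wpg ++ [wc'], cur ++ c, wc')

def get_word_pos (graphemes : List String) (padding_idx : Int) (bpe_whitespace_tok : String) (boundary_same_pos : Bool) (append_eos : Bool) (eos_symbol : String) (boundary_start_pos : Option Int) : (List (String × Int)) × List Int :=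
  let bsp := boundary_start_pos.getD (padding_idx + 1)
  let wc0 := if boundary_same_pos then bsp else padding_idx
  let st := pvALoop graphemes bpe_whitespace_tok eos_symbol boundary_same_pos bsp 0 graphemes
              ([], [], "", wc0)
  (st.1, st.2.1 ++ (if append_eos then [st.2.2.2 + 1] else []))

-- ===== PORT B =====
inductive pvSeg where
  | eos : pvSeg
  | ws : pvSeg
  | word : String → Nat → Bool → pvSeg
deriving DecidableEq, Repr

-- phase 1 of B: parse into segments, carrying the previous token
def pvParseSegs (ws eos : String) : String → List String → List pvSeg
  | _, [] => []
  | prev, t :: rest =>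
    if t = eos then pvSeg.eos :: pvParseSegs ws eos t rest
    else if t = ws then pvSeg.ws :: pvParseSegs ws eos t rest
    else
      let run := rest.takeWhile (fun x => decide (x ≠ eos ∧ x ≠ ws))
      pvSeg.word (String.join (t :: run)) (1 + run.length) (prev = ws) ::
        pvParseSegs ws eos (run.getLastD t) (rest.dropWhile (fun x => decide (x ≠ eos ∧ x ≠ ws)))
termination_by prev toks => toks.length
decreasing_by
  · simp
  · simp
  · simp only [List.length_cons]
    have := List.length_dropWhile_le (fun x => decide (x ≠ eos ∧ x ≠ ws)) rest
    omega

-- phase 2 of B: one step per segment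
def pvSegStep (same : Bool) (bsp : Int)
    (st : (List (String × Int)) × List Int × String × Int) (seg : pvSeg) :
    (List (String × Int)) × List Int × String × Int :=
  match st, seg with
  | (wwp, wpg, cur, wc), pvSeg.eos => (wwp ++ [(cur, wc)], wpg ++ [wc + 1], cur, wc)
  | (wwp, wpg, cur, wc), pvSeg.ws =>
      let p := if cur ≠ "" then (wwp ++ [(cur, wc)], "") else (wwp, cur)
      if same then (p.1, wpg ++ [bsp], p.2, wc) else (p.1, wpg ++ [wc + 1], p.2, wc + 1)
  | (wwp, wpg, cur, wc), pvSeg.word s n after =>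
      let wc' := if after then wc + 1 else wc
      (wwp, wpg ++ List.replicate n wc', cur ++ s, wc')

def get_word_pos_alt (graphemes : List String) (padding_idx : Int) (bpe_whitespace_tok : String) (boundary_same_pos : Bool) (append_eos : Bool) (eos_symbol : String) (boundary_start_pos : Option Int) : (List (String × Int)) × List Int :=
  let bsp := boundary_start_pos.getD (padding_idx + 1)
  let segs := pvParseSegs bpe_whitespace_tok eos_symbol "" graphemes
  let st := segs.foldl (pvSegStep boundary_same_pos bsp)
              ([], [], "", if boundary_same_pos then bsp else padding_idx)
  (st.1, st.2.1 ++ (if append_eos then [st.2.2.2 + 1] else []))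

-- ===== PRECONDITION & SPEC =====
-- Pre_ excludes exactly the inputs on which A raises: the empty list (IndexError) and lists whose
-- first token is not the bpe whitespace token (A's assert fails).
def Pre_get_word_pos (graphemes : List String) (padding_idx : Int) (bpe_whitespace_tok : String) (boundary_same_pos : Bool) (append_eos : Bool) (eos_symbol : String) (boundary_start_pos : Option Int) : Prop :=
  graphemes.head? = some bpe_whitespace_tok
instance (graphemes : List String) (padding_idx : Int) (bpe_whitespace_tok : String) (boundary_same_pos : Bool) (append_eos : Bool) (eos_symbol : String) (boundary_start_pos : Option Int) : Decidable (Pre_get_word_pos graphemes padding_idx bpe_whitespace_tok boundary_same_pos append_eos eos_symbol boundary_start_pos) := by unfold Pre_get_word_pos; infer_instance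

def pvWitness_get_word_pos : List String × Int × String × Bool × Bool × String × Option Int :=
  (["_", "h", "i", "_", "y", "o"], 1, "_", true, false, "</s>", none)

def Spec_get_word_pos (graphemes : List String) (padding_idx : Int) (bpe_whitespace_tok : String) (boundary_same_pos : Bool) (append_eos : Bool) (eos_symbol : String) (boundary_start_pos : Option Int) (out : (List (String × Int)) × List Int) : Prop := out = get_word_pos_alt graphemes padding_idx bpe_whitespace_tok boundary_same_pos append_eos eos_symbol boundary_start_pos
instance (graphemes : List String) (padding_idx : Int) (bpe_whitespace_tok : String) (boundary_same_pos : Bool) (append_eos : Bool) (eos_symbol : String) (boundary_start_pos : Option Int) (out : (List (String × Int)) × List Int) : Decidable (Spec_get_word_pos graphemes padding_idx bpe_whitespace_tok boundary_same_pos append_eos eos_symbol boundary_start_pos out) := by unfold Spec_get_word_pos; infer_instance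

-- ===== CLAIM (what is proved, stated in full; the proofs are below) =====
def Claim_equal_get_word_pos : Prop := ∀ (graphemes : List String) (padding_idx : Int) (bpe_whitespace_tok : String) (boundary_same_pos : Bool) (append_eos : Bool) (eos_symbol : String) (boundary_start_pos : Option Int), Dom_get_word_pos graphemes padding_idx bpe_whitespace_tok boundary_same_pos append_eos eos_symbol boundary_start_pos → Pre_get_word_pos graphemes padding_idx bpe_whitespace_tok boundary_same_pos append_eos eos_symbol boundary_start_pos → Spec_get_word_pos graphemes padding_idx bpe_whitespace_tok boundary_same_pos append_eos eos_symbol boundary_start_pos (get_word_pos graphemes padding_idx bpe_whitespace_tok boundary_same_pos append_eos eos_symbol boundary_start_pos)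

-- ===== LEMMAS AND PROOFS =====

theorem pv_join_cons (x : String) (xs : List String) :
    String.join (x :: xs) = x ++ String.join xs := by
  simp [String.join_eq]

theorem pv_run_lemma (graphemes : List String) (ws eos : String) (same : Bool) (bsp : Int) :
    ∀ (run rest : List String) (k : Nat) (wwp : List (String × Int)) (wpg : List Int)
      (cur : String) (wc : Int),
      graphemes.drop k = run ++ rest →
      (∀ x ∈ run, ¬x = eos ∧ ¬x = ws) →
      (PySem.List.pyGet? graphemes ((k : Int) - 1)).getD "" ≠ ws →
      pvALoop graphemes ws eos same bsp k (run ++ rest) (wwp, wpg, cur, wc)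
        = pvALoop graphemes ws eos same bsp (k + run.length) rest
            (wwp, wpg ++ List.replicate run.length wc, cur ++ String.join run, wc) := by
  intro run
  induction run with
  | nil => intro rest k wwp wpg cur wc _ _ _; simp [String.join]
  | cons x xs ih =>
    intro rest k wwp wpg cur wc hdrop hmem hprev
    have hx := hmem x (List.mem_cons_self ..)
    have hgk : graphemes[k]? = some x := by
      have : (graphemes.drop k)[0]? = some x := by rw [hdrop]; rfl
      simpa using this
    simp only [List.cons_append, pvALoop, if_neg hx.1, if_neg hx.2, if_neg hprev]
    have hdrop' : graphemes.drop (k + 1) = xs ++ rest := by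
      have h1 : graphemes.drop (k + 1) = (graphemes.drop k).drop 1 := by rw [List.drop_drop]
      rw [h1, hdrop]; rfl
    have hprev' : (PySem.List.pyGet? graphemes (((k + 1 : Nat) : Int) - 1)).getD "" ≠ ws := by
      have hc : ((k + 1 : Nat) : Int) - 1 = (k : Int) := by push_cast; ring
      rw [hc, PySem.List.pyGet?_natCast, hgk]
      simpa using hx.2
    rw [ih rest (k + 1) wwp (wpg ++ [wc]) (cur ++ x) wc hdrop'
        (fun y hy => hmem y (List.mem_cons_of_mem _ hy)) hprev']
    have hk : k + 1 + xs.length = k + (x :: xs).length := by simp; omega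
    rw [hk, pv_join_cons]
    simp [List.replicate_succ, String.append_assoc]

theorem pv_last_of_run (t : String) (xs rest : List String) :
    (t :: (xs ++ rest))[xs.length]? = some (xs.getLastD t) := by
  induction xs generalizing t with
  | nil => rfl
  | cons y ys ih =>
    simp only [List.cons_append, List.length_cons, List.getElem?_cons_succ]
    rw [ih y]
    cases ys <;> simp [List.getLastD]

theorem pv_main_lemma (graphemes : List String) (ws eos : String) (same : Bool) (bsp : Int) :
    ∀ (n : Nat) (toks : List String), toks.length ≤ n →
    ∀ (k : Nat) (st : (List (String × Int)) × List Int × String × Int),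
      graphemes.drop k = toks →
      pvALoop graphemes ws eos same bsp k toks st
        = List.foldl (pvSegStep same bsp) st
            (pvParseSegs ws eos ((PySem.List.pyGet? graphemes ((k : Int) - 1)).getD "") toks) := by
  intro n
  induction n with
  | zero =>
    intro toks hlen k st _
    have : toks = [] := List.eq_nil_of_length_eq_zero (Nat.le_zero.mp hlen)
    subst this; simp [pvALoop, pvParseSegs]
  | succ n ih =>
    intro toks hlen k st hdrop
    match toks, st with
    | [], _ => simp [pvALoop, pvParseSegs]
    | t :: rest, (wwp, wpg, cur, wc) =>
      have hgk : graphemes[k]? = some t := by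
        have : (graphemes.drop k)[0]? = some t := by rw [hdrop]; rfl
        simpa using this
      have hdrop' : graphemes.drop (k + 1) = rest := by
        have h1 : graphemes.drop (k + 1) = (graphemes.drop k).drop 1 := by rw [List.drop_drop]
        rw [h1, hdrop]; rfl
      have hcast : ((k + 1 : Nat) : Int) - 1 = (k : Int) := by push_cast; ring
      have hprevnext : (PySem.List.pyGet? graphemes (((k + 1 : Nat) : Int) - 1)).getD "" = t := by
        rw [hcast, PySem.List.pyGet?_natCast, hgk]; rfl
      have hlenr : rest.length ≤ n := by simpa using hlen
      by_cases ht : t = eos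
      · rw [pvParseSegs]
        simp only [pvALoop, if_pos ht, List.foldl_cons]
        rw [ih rest hlenr (k + 1) _ hdrop', hprevnext]
        subst ht; rfl
      · by_cases hw : t = ws
        · rw [pvParseSegs]
          simp only [pvALoop, if_neg ht, if_pos hw, List.foldl_cons, pvSegStep]
          rcases Bool.eq_false_or_eq_true same with hs | hs <;> subst hs <;>
            simp only [if_true, if_false, Bool.false_eq_true] <;>
            rw [ih rest hlenr (k + 1) _ hdrop', hprevnext] <;> (subst hw; rfl)
        · -- a maximal word run starting at t
          rw [pvParseSegs]
          simp only [if_neg ht, if_neg hw, List.foldl_cons]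
          set run := rest.takeWhile (fun x => decide (x ≠ eos ∧ x ≠ ws)) with hrun
          set rest' := rest.dropWhile (fun x => decide (x ≠ eos ∧ x ≠ ws)) with hrest'
          have hsplit : rest = run ++ rest' := (List.takeWhile_append_dropWhile).symm
          have hmemrun : ∀ x ∈ run, ¬x = eos ∧ ¬x = ws := by
            intro x hx
            have := List.mem_takeWhile_imp hx
            simpa using this
          have hlen' : rest'.length ≤ n := by
            have h1 : rest'.length ≤ rest.length := List.length_dropWhile_le _ _
            omega
          have hdrop'' : graphemes.drop (k + 1 + run.length) = rest' := by
            have h2 : graphemes.drop (k + 1 + run.length)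
                = (graphemes.drop (k + 1)).drop run.length := by
              rw [List.drop_drop]; try ring_nf
            rw [h2, hdrop', hsplit, List.drop_left]
          have hprevlast :
              (PySem.List.pyGet? graphemes (((k + 1 + run.length : Nat) : Int) - 1)).getD ""
                = run.getLastD t := by
            have hc : ((k + 1 + run.length : Nat) : Int) - 1 = ((k + run.length : Nat) : Int) := by
              push_cast; ring
            rw [hc, PySem.List.pyGet?_natCast]
            have h3 : graphemes[k + run.length]? = some (run.getLastD t) := by
              have hd : (graphemes.drop k)[run.length]? = some (run.getLastD t) := by
                rw [hdrop, hsplit]; exact pv_last_of_run t run rest'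
              rw [List.getElem?_drop] at hd; exact hd
            rw [h3]; rfl
          simp only [pvALoop, if_neg ht, if_neg hw]
          rw [show rest = run ++ rest' from hsplit]
          by_cases hprev : (PySem.List.pyGet? graphemes ((k : Int) - 1)).getD "" = ws <;>
            [rw [if_pos hprev]; rw [if_neg hprev]] <;>
            rw [pv_run_lemma graphemes ws eos same bsp run rest' (k + 1) _ _ _ _
                (by rw [hdrop', hsplit]) hmemrun (by rw [hprevnext]; exact hw),
              ih rest' hlen' (k + 1 + run.length) _ hdrop'', hprevlast]
          all_goals simp [pvSegStep, hprev, Nat.add_comm 1 run.length, List.replicate_succ,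
            String.append_assoc, pv_join_cons]

theorem pv_parse_head_ws (ws eos p q : String) (rest : List String) :
    pvParseSegs ws eos p (ws :: rest) = pvParseSegs ws eos q (ws :: rest) := by
  rw [pvParseSegs, pvParseSegs]
  by_cases h : ws = eos <;> simp [h]

-- ===== VERDICT (by name: the statement is the Claim_ definition above) =====
theorem get_word_pos_spec : Claim_equal_get_word_pos := by
  intro graphemes padding_idx ws same ae eos bsp0 _ hpre
  unfold Spec_get_word_pos get_word_pos get_word_pos_alt
  obtain ⟨rest, hg⟩ : ∃ rest, graphemes = ws :: rest := by
    cases graphemes with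
    | nil => simp [Pre_get_word_pos] at hpre
    | cons a l =>
      simp [Pre_get_word_pos] at hpre
      exact ⟨l, by rw [hpre]⟩
  have hmain := pv_main_lemma graphemes ws eos same (bsp0.getD (padding_idx + 1))
      graphemes.length graphemes le_rfl 0
      ([], [], "", if same then (bsp0.getD (padding_idx + 1)) else padding_idx) (by simp)
  simp only [hmain]
  rw [hg, pv_parse_head_ws ws eos _ ""]
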